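-- pv_equiv track=rewrite | github.com/andreamust/harte-library | src/harte_utils.py | clean_asterisks
-- ===== SOURCE A (Python) =====
-- def clean_asterisks(chord_grades: list) -> list:
--     """
--
--     :param chord_grades:
--     :return:
--     """
--     ask_list = sorted(i for i, x in enumerate(chord_grades) if '*' in x)[::-1]
--     if len(ask_list) > 0:
--         removed_grades = [chord_grades.pop(k) for k in ask_list]
--         for grade in removed_grades:
--             grade_to_remove = ''.join([el for el in grade if el.isdigit()])
--             if grade_to_remove in chord_grades:
--                 chord_grades.remove(grade_to_remove)
--     return chord_grades
-- ===== SOURCE B (Python) =====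
-- def clean_asterisks(chord_grades: list) -> list:
--     """Partition pass with a pending-removal counter, then a rebuild pass, instead of index pops and repeated .remove scans."""
--     pending = {}
--     kept = []
--     for x in chord_grades:
--         if '*' in x:
--             key = ''.join(c for c in x if c.isdigit())
--             pending[key] = pending.get(key, 0) + 1
--         else:
--             kept.append(x)
--     result = []
--     for x in kept:
--         if pending.get(x, 0) > 0:
--             pending[x] = pending[x] - 1
--         else:
--             result.append(x)
--     chord_grades[:] = result
--     return chord_grades
-- ===== Notes on version B (the rewrite author's own statement) =====
-- stated objective: alternative
-- what changed: Replaces the descending-index pop pass plus per-grade 'in'/.remove scans with one partition pass that counts pending digit-string removals in a dict and one rebuild pass that skips counted elements.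
import Mathlib
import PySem

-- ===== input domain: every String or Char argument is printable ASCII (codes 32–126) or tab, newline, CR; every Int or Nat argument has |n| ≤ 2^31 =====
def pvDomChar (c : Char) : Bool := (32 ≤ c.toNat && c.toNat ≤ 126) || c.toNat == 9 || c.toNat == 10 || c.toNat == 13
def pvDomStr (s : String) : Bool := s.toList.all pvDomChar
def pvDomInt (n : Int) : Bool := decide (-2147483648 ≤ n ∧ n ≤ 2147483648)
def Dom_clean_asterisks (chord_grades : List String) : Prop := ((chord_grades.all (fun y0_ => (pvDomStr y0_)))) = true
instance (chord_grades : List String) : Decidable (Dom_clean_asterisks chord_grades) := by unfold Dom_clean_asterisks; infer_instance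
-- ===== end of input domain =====

-- B replaces A's descending-index pops plus per-grade `in`/.remove scans by one partition pass with a
-- pending-removal counter dict and one rebuild pass (objective: alternative single-pass structure).
-- Both Pythons mutate chord_grades in place and return the same object; the equivalence here is about the
-- returned value.

-- ===== PORT A =====
-- shared helper: '*' in x
def pvStar (x : String) : Bool := PySem.Str.isIn "*" x
-- shared helper: ''.join([el for el in grade if el.isdigit()]) — exact on ASCII: join of single chars is the filtered string
def pvDigits (x : String) : String := String.ofList (x.toList.filter (fun c => PySem.Chars.isdigit c))
-- sorted(i for i, x in enumerate(chord_grades) if '*' in x)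
def pvIdxs (l : List String) (s : Int) : List Int :=
  (PySem.List.enumerate l s).filterMap (fun p => if pvStar p.2 then some p.1 else none)
-- one step of [chord_grades.pop(k) for k in ask_list] (state: current list, removed_grades so far);
-- pop? never fails here (ask_list holds valid descending indices); the none branch is unreachable
def pvPopStep (st : List String × List String) (k : Int) : List String × List String :=
  match PySem.List.pop? st.1 k with
  | some r => (r.2, st.2 ++ [r.1])
  | none => st
-- body of "for grade in removed_grades: … if grade_to_remove in chord_grades: chord_grades.remove(…)"
def pvRemoveStep (cg : List String) (g : String) : List String :=
  let gtr := pvDigits g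
  if cg.contains gtr then (PySem.List.remove? cg gtr).getD cg else cg

def clean_asterisks (chord_grades : List String) : List String :=
  let ask_list := (PySem.List.slice? (PySem.List.sorted (pvIdxs chord_grades 0) (fun i => i)) none none (-1)).getD []
  if ask_list.length > 0 then
    let st := ask_list.foldl pvPopStep (chord_grades, [])
    st.2.foldl pvRemoveStep st.1
  else chord_grades

-- ===== PORT B =====
-- first loop: partition; asterisk grades bump the pending counter of their digit string, others are kept
def pvPartStep (st : PySem.Dict String Int × List String) (x : String) : PySem.Dict String Int × List String :=
  if pvStar x then (st.1.modify (pvDigits x) 0 (fun v => v + 1), st.2) else (st.1, st.2 ++ [x])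
-- second loop: rebuild, skipping an element while its pending count is positive
def pvSkipStep (st : PySem.Dict String Int × List String) (x : String) : PySem.Dict String Int × List String :=
  if st.1.getD x 0 > 0 then (st.1.modify x 0 (fun v => v - 1), st.2) else (st.1, st.2 ++ [x])

def clean_asterisks_alt (chord_grades : List String) : List String :=
  let st := chord_grades.foldl pvPartStep (PySem.Dict.empty, [])
  (st.2.foldl pvSkipStep (st.1, [])).2

-- ===== PRECONDITION & SPEC =====
def Spec_clean_asterisks (chord_grades : List String) (out : List String) : Prop := out = clean_asterisks_alt chord_grades
instance (chord_grades : List String) (out : List String) : Decidable (Spec_clean_asterisks chord_grades out) := by unfold Spec_clean_asterisks; infer_instance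

-- ===== CLAIM (what is proved, stated in full; the proofs are below) =====
def Claim_equal_clean_asterisks : Prop := ∀ (chord_grades : List String), Dom_clean_asterisks chord_grades → Spec_clean_asterisks chord_grades (clean_asterisks chord_grades)

-- ===== LEMMAS AND PROOFS =====

theorem pvIdxs_cons (x : String) (l : List String) (s : Int) :
    pvIdxs (x :: l) s = if pvStar x then s :: pvIdxs l (s+1) else pvIdxs l (s+1) := by
  simp only [pvIdxs, PySem.List.enumerate_cons, List.filterMap_cons]
  split <;> simp_all

theorem pvIdxs_lb (l : List String) : ∀ (s : Int), ∀ k ∈ pvIdxs l s, s ≤ k := by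
  induction l with
  | nil => simp [pvIdxs]
  | cons x l ih =>
    intro s k hk
    rw [pvIdxs_cons] at hk
    split at hk
    · rcases List.mem_cons.mp hk with heq | hk
      · omega
      · have := ih (s+1) k hk; omega
    · have := ih (s+1) k hk; omega

theorem pvIdxs_pairwise (l : List String) : ∀ (s : Int), (pvIdxs l s).Pairwise (· ≤ ·) := by
  induction l with
  | nil => simp [pvIdxs]
  | cons x l ih =>
    intro s
    rw [pvIdxs_cons]
    split
    · exact List.Pairwise.cons (fun k hk => by have := pvIdxs_lb l (s+1) k hk; omega) (ih (s+1))
    · exact ih (s+1)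

theorem pvIdxs_shift (l : List String) : ∀ (s : Int), pvIdxs l (s+1) = (pvIdxs l s).map (· + 1) := by
  induction l with
  | nil => simp [pvIdxs]
  | cons x l ih =>
    intro s
    rw [pvIdxs_cons, pvIdxs_cons]
    by_cases hx : pvStar x
    · simp only [hx, if_true, List.map_cons]
      rw [ih (s+1)]
    · simp only [hx, Bool.false_eq_true, ite_false]
      exact ih (s+1)

theorem pvIdxs_nil_filter (l : List String) : ∀ (s : Int), pvIdxs l s = [] → l.filter (fun x => pvStar x) = [] := by
  induction l with
  | nil => simp
  | cons x l ih =>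
    intro s hs
    rw [pvIdxs_cons] at hs
    split at hs
    · exact absurd hs (by simp)
    · rename_i hx
      simp only [List.filter_cons, hx]
      exact ih (s+1) hs

theorem pop_none {α : Type} (m : List α) (n : Nat) (hn : m.length ≤ n) :
    PySem.List.pop? m (n:Int) = none := by
  simp only [PySem.List.pop?, PySem.List.pyIdx?]
  rw [if_pos (by omega), if_neg (by exact_mod_cast Nat.not_lt.mpr hn)]
  rfl

theorem pop_succ {α : Type} (x : α) (m : List α) (k : Int) (h : 0 ≤ k) :
    PySem.List.pop? (x::m) (k+1) = (PySem.List.pop? m k).map (fun r => (r.1, x :: r.2)) := by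
  obtain ⟨n, rfl⟩ := Int.eq_ofNat_of_zero_le h
  by_cases hn : n < m.length
  · rw [show ((n:Int)+1) = ((n+1:Nat):Int) by push_cast; ring]
    rw [PySem.List.pop?_natCast _ (n+1) (by simpa using hn), PySem.List.pop?_natCast _ n hn]
    simp
  · rw [show ((n:Int)+1) = ((n+1:Nat):Int) by push_cast; ring]
    rw [pop_none _ _ (by simp; omega), pop_none _ _ (by omega)]
    rfl

theorem pvPopStep_succ (x : String) (m : List String) (a : List String) (k : Int) (h : 0 ≤ k) :
    pvPopStep (x::m, a) (k+1) = ((pvPopStep (m, a) k).1.cons x, (pvPopStep (m, a) k).2) := by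
  simp only [pvPopStep, pop_succ x m k h]
  cases PySem.List.pop? m k <;> rfl

theorem popfold_succ (ks : List Int) : ∀ (m a : List String) (x : String), (∀ k ∈ ks, 0 ≤ k) →
    List.foldl pvPopStep (x::m, a) (ks.map (· + 1)) =
      ((List.foldl pvPopStep (m, a) ks).1.cons x, (List.foldl pvPopStep (m, a) ks).2) := by
  induction ks with
  | nil => intro m a x _; rfl
  | cons k ks ih =>
    intro m a x hks
    simp only [List.map_cons, List.foldl_cons]
    rw [pvPopStep_succ x m a k (hks k (by simp))]
    exact ih _ _ x (fun j hj => hks j (by simp [hj]))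

theorem popfold_main (l : List String) : ∀ (a : List String),
    List.foldl pvPopStep (l, a) ((pvIdxs l 0).reverse) =
      (l.filter (fun x => !pvStar x), a ++ (l.filter (fun x => pvStar x)).reverse) := by
  induction l with
  | nil => simp [pvIdxs]
  | cons x l ih =>
    intro a
    have hsh : pvIdxs l 1 = (pvIdxs l 0).map (· + 1) := by
      have := pvIdxs_shift l 0; simpa using this
    have hnn : ∀ k ∈ (pvIdxs l 0).reverse, 0 ≤ k := by
      intro k hk; exact pvIdxs_lb l 0 k (List.mem_reverse.mp hk)
    rw [pvIdxs_cons, show (0:Int)+1 = 1 from rfl, hsh]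
    by_cases hx : pvStar x
    · simp only [hx, if_true]
      rw [show ((0:Int) :: (pvIdxs l 0).map (· + 1)).reverse
            = ((pvIdxs l 0).reverse.map (· + 1)) ++ [(0:Int)] by simp]
      rw [List.foldl_append, popfold_succ _ l a x hnn, ih a]
      simp only [List.foldl_cons, List.foldl_nil]
      have : pvPopStep ((l.filter (fun x => !pvStar x)).cons x, a ++ (l.filter (fun x => pvStar x)).reverse) 0
          = (l.filter (fun x => !pvStar x), (a ++ (l.filter (fun x => pvStar x)).reverse) ++ [x]) := by
        simp [pvPopStep, PySem.List.pop?_zero_cons]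
      rw [this]
      simp [hx]
    · simp only [hx, Bool.false_eq_true, ite_false]
      rw [show ((pvIdxs l 0).map (· + 1)).reverse = (pvIdxs l 0).reverse.map (· + 1) by simp]
      rw [popfold_succ _ l a x hnn, ih a]
      simp [List.filter_cons, hx]

theorem pvRemoveStep_erase (cg : List String) (g : String) :
    pvRemoveStep cg g = cg.erase (pvDigits g) := by
  simp only [pvRemoveStep]
  by_cases h : cg.contains (pvDigits g)
  · rw [if_pos h, PySem.List.remove?_eq_some_erase cg _ (by simpa using h)]
    rfl
  · rw [if_neg h, List.erase_of_not_mem (by simpa using h)]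

theorem erase_foldl_nil (gs : List String) :
    List.foldl (fun (cg : List String) g => cg.erase g) [] gs = [] := by
  induction gs with
  | nil => rfl
  | cons g gs ih => simpa using ih

theorem erase_foldl_cons (gs : List String) : ∀ (x : String) (l : List String),
    List.foldl (fun cg g => cg.erase g) (x :: l) gs =
      if x ∈ gs then List.foldl (fun cg g => cg.erase g) l (gs.erase x)
      else x :: List.foldl (fun cg g => cg.erase g) l gs := by
  induction gs with
  | nil => simp
  | cons g gs ih =>
    intro x l
    by_cases hgx : g = x
    · subst hgx
      simp
    · have h1 : (x == g) = false := beq_eq_false_iff_ne.mpr (fun h => hgx h.symm)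
      have h2 : (g == x) = false := beq_eq_false_iff_ne.mpr hgx
      simp only [List.foldl_cons, List.erase_cons, h1, h2, Bool.false_eq_true, ite_false]
      rw [ih x (l.erase g)]
      by_cases hx : x ∈ gs
      · rw [if_pos hx, if_pos (List.mem_cons_of_mem g hx)]
      · rw [if_neg hx, if_neg (by
          intro h
          rcases List.mem_cons.mp h with h' | h'
          · exact hgx h'.symm
          · exact hx h')]

theorem partfold_main (l : List String) : ∀ (d : PySem.Dict String Int) (a : List String),
    List.foldl pvPartStep (d, a) l =
      (((l.filter (fun x => pvStar x)).map pvDigits).foldl (fun d k => d.modify k 0 (fun v => v + 1)) d,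
        a ++ l.filter (fun x => !pvStar x)) := by
  induction l with
  | nil => simp
  | cons x l ih =>
    intro d a
    by_cases hx : pvStar x
    · simp only [List.foldl_cons, pvPartStep, hx, if_pos, List.filter_cons]
      rw [ih]
      simp [hx]
    · simp only [List.foldl_cons, pvPartStep, hx, Bool.false_eq_true, if_neg, List.filter_cons]
      rw [ih]
      simp [hx]

theorem skipfold_main (l : List String) : ∀ (d : PySem.Dict String Int) (a : List String) (gs : List String),
    (∀ v, d.getD v 0 = (gs.count v : Int)) →
    (List.foldl pvSkipStep (d, a) l).2 = a ++ List.foldl (fun cg g => cg.erase g) l gs := by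
  induction l with
  | nil =>
    intro d a gs _
    simp [erase_foldl_nil]
  | cons x l ih =>
    intro d a gs hinv
    rw [erase_foldl_cons]
    by_cases hx : x ∈ gs
    · have hc : 0 < gs.count x := List.count_pos_iff.mpr hx
      simp only [List.foldl_cons, pvSkipStep, hinv x]
      rw [if_pos (show ((gs.count x : Int)) > 0 by exact_mod_cast hc), if_pos hx]
      refine ih _ _ (gs.erase x) ?_
      intro v
      by_cases hvx : v = x
      · subst hvx
        rw [PySem.Dict.getD_modify_self, hinv v, List.count_erase_self]
        push_cast [hc]
        omega
      · rw [PySem.Dict.getD_modify_of_ne _ _ _ hvx, hinv v,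
          List.count_erase_of_ne (by simpa using hvx)]
    · have hc : gs.count x = 0 := List.count_eq_zero.mpr hx
      simp only [List.foldl_cons, pvSkipStep, hinv x, hc]
      rw [if_neg (by norm_num), if_neg hx]
      rw [ih _ _ gs hinv]
      simp

-- both branches of A equal the erase-fold of the kept elements over the removed digit strings
theorem a_char (cg : List String) :
    clean_asterisks cg =
      List.foldl (fun l g => l.erase g) (cg.filter (fun x => !pvStar x))
        (((cg.filter (fun x => pvStar x)).reverse).map pvDigits) := by
  unfold clean_asterisks
  rw [PySem.List.sorted_eq_self_of_pairwise _ _ (pvIdxs_pairwise cg 0),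
    PySem.List.slice?_none_none_neg_one]
  simp only [Option.getD_some]
  by_cases h : (pvIdxs cg 0).reverse.length > 0
  · rw [if_pos h, popfold_main cg []]
    simp only [List.nil_append]
    rw [show pvRemoveStep = fun cg g => cg.erase (pvDigits g) from
      funext fun cg => funext fun g => pvRemoveStep_erase cg g]
    rw [List.foldl_map]
  · rw [if_neg h]
    have hnil : pvIdxs cg 0 = [] := by
      cases heq : (pvIdxs cg 0).reverse with
      | nil => simpa using congrArg List.reverse heq
      | cons y ys => rw [heq] at h; simp at h
    have hstars : cg.filter (fun x => pvStar x) = [] := pvIdxs_nil_filter cg 0 hnil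
    rw [hstars]
    simp only [List.reverse_nil, List.map_nil, List.foldl_nil]
    exact (List.filter_eq_self.mpr (fun x hx => by
      have : x ∉ cg.filter (fun x => pvStar x) := by rw [hstars]; simp
      simp only [List.mem_filter, hx, true_and] at this
      simpa using this)).symm

theorem b_char (cg : List String) :
    clean_asterisks_alt cg =
      List.foldl (fun l g => l.erase g) (cg.filter (fun x => !pvStar x))
        (((cg.filter (fun x => pvStar x)).reverse).map pvDigits) := by
  unfold clean_asterisks_alt
  rw [partfold_main cg PySem.Dict.empty []]
  simp only [List.nil_append]
  rw [skipfold_main _ _ [] (((cg.filter (fun x => pvStar x)).reverse).map pvDigits) ?_]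
  · simp
  · intro v
    rw [PySem.Dict.getD_foldl_modify_add_one, PySem.Dict.getD_empty]
    simp [List.count_reverse, List.map_reverse]

-- ===== VERDICT (by name: the statement is the Claim_ definition above) =====
theorem clean_asterisks_spec : Claim_equal_clean_asterisks := by
  intro cg _
  unfold Spec_clean_asterisks
  rw [a_char, b_char]
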